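-- pv_equiv track=rewrite | github.com/mariasarahmata/NSCOM03 | Lab3/2D_Parity.py | add_2d_parity
-- ===== SOURCE A (Python) =====
-- def add_2d_parity(data, rows, cols):
--     """
--     Creates a 2D parity matrix and adds row and column parity bits.
--     """
--     # Convert data into a 2D matrix of integers
--     matrix = [[int(data[i * cols + j]) for j in range(cols)] for i in range(rows)]
--
--     # Calculate row parity (add an extra column for parity bits)
--     for row in matrix:
--         row.append(sum(row) % 2)  # Even parity for the row
--
--     # Calculate column parity (add an extra row for parity bits)
--     col_parity = [(sum(matrix[i][j] for i in range(rows)) % 2) for j in range(cols)]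
--     col_parity.append(sum(col_parity) % 2)  # Even parity for the parity row
--
--     # Add the column parity as the last row in the matrix
--     matrix.append(col_parity)
--
--     return matrix
-- ===== SOURCE B (Python) =====
-- def add_2d_parity(data, rows, cols):
--     # Single fused pass: build each row, append its parity, and accumulate
--     # the column sums on the fly; derive the parity row afterwards.
--     matrix = []
--     col_sums = [0] * cols
--     for i in range(rows):
--         row = [int(data[i * cols + j]) for j in range(cols)]
--         col_sums = [s + b for s, b in zip(col_sums, row)]
--         matrix.append(row + [sum(row) % 2])
--     col_parity = [s % 2 for s in col_sums]
--     matrix.append(col_parity + [sum(col_parity) % 2])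
--     return matrix
-- ===== Notes on version B (the rewrite author's own statement) =====
-- stated objective: alternative
-- what changed: Replaces A's two separate passes (row-parity loop, then a nested column scan re-indexing the matrix) with one fused pass that accumulates column sums while building each parity-extended row; the column-parity row is then derived directly from the sums.
import Mathlib
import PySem

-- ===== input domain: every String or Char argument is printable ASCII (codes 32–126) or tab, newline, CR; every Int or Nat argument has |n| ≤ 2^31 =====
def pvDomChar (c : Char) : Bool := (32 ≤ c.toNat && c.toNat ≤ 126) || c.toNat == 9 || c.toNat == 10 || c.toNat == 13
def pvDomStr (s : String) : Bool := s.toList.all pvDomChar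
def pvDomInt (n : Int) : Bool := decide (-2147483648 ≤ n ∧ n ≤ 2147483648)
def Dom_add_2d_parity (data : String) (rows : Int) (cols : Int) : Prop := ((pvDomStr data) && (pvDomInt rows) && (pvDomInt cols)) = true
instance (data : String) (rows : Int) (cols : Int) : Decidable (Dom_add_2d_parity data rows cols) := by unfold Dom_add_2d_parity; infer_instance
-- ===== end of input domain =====

-- B fuses A's two passes (row parities, then a nested column re-scan of the matrix)
-- into one pass that accumulates column sums while emitting each parity-extended row
-- (objective: alternative decomposition, same asymptotic cost).

-- ===== PORT A =====
-- int(data[k]) for one character: none-cases (IndexError / ValueError) are excluded by Pre_.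
def pvIntAt (data : String) (k : Int) : Int :=
  match PySem.Str.pyGet? data k with
  | some c => (PySem.Int.ofChars? [c]).getD 0
  | none => 0

-- [int(data[i*cols+j]) for j in range(cols)]  (the inner comprehension, identical in A and B)
def pvRow (data : String) (cols : Int) (i : Int) : List Int :=
  (PySem.List.pyRange 0 cols 1).map (fun j => pvIntAt data (i * cols + j))

def add_2d_parity (data : String) (rows : Int) (cols : Int) : List (List Int) :=
  -- matrix = [[int(data[i*cols+j]) for j in range(cols)] for i in range(rows)]
  let matrix := (PySem.List.pyRange 0 rows 1).map (fun i => pvRow data cols i)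
  -- for row in matrix: row.append(sum(row) % 2)
  let matrix2 := matrix.map (fun row => row ++ [PySem.Int.mod row.sum 2])
  -- col_parity = [(sum(matrix[i][j] for i in range(rows)) % 2) for j in range(cols)]
  let colParity := (PySem.List.pyRange 0 cols 1).map (fun j =>
    PySem.Int.mod ((PySem.List.pyRange 0 rows 1).map (fun i =>
      PySem.List.pyGetD (PySem.List.pyGetD matrix2 i []) j 0)).sum 2)
  -- col_parity.append(sum(col_parity) % 2); matrix.append(col_parity)
  matrix2 ++ [colParity ++ [PySem.Int.mod colParity.sum 2]]

-- ===== PORT B =====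
-- loop body of Source B: state = (matrix, col_sums)
def pvStepB (data : String) (cols : Int)
    (st : List (List Int) × List Int) (i : Int) : List (List Int) × List Int :=
  let row := pvRow data cols i
  (st.1 ++ [row ++ [PySem.Int.mod row.sum 2]], List.zipWith (· + ·) st.2 row)

def add_2d_parity_alt (data : String) (rows : Int) (cols : Int) : List (List Int) :=
  -- col_sums = [0] * cols; single pass over range(rows)
  let st := (PySem.List.pyRange 0 rows 1).foldl (pvStepB data cols)
    ([], List.replicate cols.toNat 0)
  -- col_parity = [s % 2 for s in col_sums]
  let colParity := st.2.map (fun s => PySem.Int.mod s 2)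
  st.1 ++ [colParity ++ [PySem.Int.mod colParity.sum 2]]

-- ===== PRECONDITION & SPEC =====
-- Pre_ excludes exactly the inputs where Python A raises: an IndexError (data shorter
-- than the rows*cols cells read) or a ValueError (a read character not a decimal digit).
def Pre_add_2d_parity (data : String) (rows : Int) (cols : Int) : Prop :=
  rows ≤ 0 ∨ cols ≤ 0 ∨
    (rows * cols ≤ (data.toList.length : Int) ∧
      ((data.toList.take (rows * cols).toNat).all Char.isDigit) = true)
instance (data : String) (rows : Int) (cols : Int) : Decidable (Pre_add_2d_parity data rows cols) := by
  unfold Pre_add_2d_parity; infer_instance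

def pvWitness_add_2d_parity : String × Int × Int := ("101110", 2, 3)

def Spec_add_2d_parity (data : String) (rows : Int) (cols : Int) (out : List (List Int)) : Prop := out = add_2d_parity_alt data rows cols
instance (data : String) (rows : Int) (cols : Int) (out : List (List Int)) : Decidable (Spec_add_2d_parity data rows cols out) := by unfold Spec_add_2d_parity; infer_instance

-- ===== CLAIM (what is proved, stated in full; the proofs are below) =====
def Claim_equal_add_2d_parity : Prop := ∀ (data : String) (rows : Int) (cols : Int), Dom_add_2d_parity data rows cols → Pre_add_2d_parity data rows cols → Spec_add_2d_parity data rows cols (add_2d_parity data rows cols)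

-- ===== LEMMAS AND PROOFS =====

theorem pvRow_length (data : String) (cols : Int) (i : Int) :
    (pvRow data cols i).length = cols.toNat := by
  simp [pvRow, PySem.List.length_pyRange_one]

theorem foldB_fst (data : String) (cols : Int) :
    ∀ (is : List Int) (m : List (List Int)) (cs : List Int),
      (is.foldl (pvStepB data cols) (m, cs)).1 =
        m ++ is.map (fun i => pvRow data cols i ++ [PySem.Int.mod (pvRow data cols i).sum 2]) := by
  intro is
  induction is with
  | nil => intro m cs; simp
  | cons i is ih =>
    intro m cs
    simp only [List.foldl_cons, List.map_cons, pvStepB]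
    rw [ih]
    simp

theorem foldB_snd_length (data : String) (cols : Int) :
    ∀ (is : List Int) (m : List (List Int)) (cs : List Int), cs.length = cols.toNat →
      (is.foldl (pvStepB data cols) (m, cs)).2.length = cols.toNat := by
  intro is
  induction is with
  | nil => intro m cs h; simpa using h
  | cons i is ih =>
    intro m cs h
    simp only [List.foldl_cons, pvStepB]
    exact ih _ _ (by simp [h, pvRow_length])

theorem foldB_snd_getElem (data : String) (cols : Int) :
    ∀ (is : List Int) (m : List (List Int)) (cs : List Int) (h : cs.length = cols.toNat)
      (k : Nat) (hk : k < cols.toNat),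
      (is.foldl (pvStepB data cols) (m, cs)).2[k]'(by
          rw [foldB_snd_length data cols is m cs h]; exact hk) =
        cs[k]'(by rw [h]; exact hk) +
          (is.map (fun i => pvIntAt data (i * cols + (k : Int)))).sum := by
  intro is
  induction is with
  | nil => intro m cs h k hk; simp
  | cons i is ih =>
    intro m cs h k hk
    simp only [List.foldl_cons, pvStepB, List.map_cons, List.sum_cons]
    rw [ih _ _ (by simp [h, pvRow_length]) k hk]
    have hz : (List.zipWith (· + ·) cs (pvRow data cols i))[k]'(by
        simp [List.length_zipWith, h, pvRow_length]; omega) =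
        cs[k]'(by rw [h]; exact hk) + (pvRow data cols i)[k]'(by rw [pvRow_length]; exact hk) := by
      rw [List.getElem_zipWith]
    rw [hz]
    have hr : (pvRow data cols i)[k]'(by rw [pvRow_length]; exact hk) =
        pvIntAt data (i * cols + (k : Int)) := by
      simp [pvRow, PySem.List.getElem_pyRange_one]
    rw [hr]; ring

-- A's column-parity list equals B's: both entries at k are (Σ_i data-bit(i,k)) % 2.
theorem colParity_eq (data : String) (rows : Int) (cols : Int) :
    ((PySem.List.pyRange 0 cols 1).map (fun j =>
      PySem.Int.mod ((PySem.List.pyRange 0 rows 1).map (fun i =>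
        PySem.List.pyGetD (PySem.List.pyGetD
          ((PySem.List.pyRange 0 rows 1).map (fun i =>
            pvRow data cols i ++ [PySem.Int.mod (pvRow data cols i).sum 2])) i [])
          j 0)).sum 2)) =
    (((PySem.List.pyRange 0 rows 1).foldl (pvStepB data cols)
        ([], List.replicate cols.toNat 0)).2.map (fun s => PySem.Int.mod s 2)) := by
  apply List.ext_getElem
  · simp [PySem.List.length_pyRange_one,
      foldB_snd_length data cols _ _ _ (List.length_replicate ..)]
  · intro k h1 h2
    have hk : k < cols.toNat := by
      simpa [PySem.List.length_pyRange_one] using h1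
    rw [List.getElem_map, List.getElem_map]
    rw [foldB_snd_getElem data cols _ _ _ (List.length_replicate ..) k hk]
    rw [PySem.List.getElem_pyRange_one]
    have hinner : ∀ i ∈ PySem.List.pyRange 0 rows 1,
        PySem.List.pyGetD (PySem.List.pyGetD
          ((PySem.List.pyRange 0 rows 1).map (fun i =>
            pvRow data cols i ++ [PySem.Int.mod (pvRow data cols i).sum 2])) i [])
          (0 + (k : Int)) 0 = pvIntAt data (i * cols + (k : Int)) := by
      intro i hi
      rw [PySem.List.mem_pyRange_one] at hi
      rw [PySem.List.pyGetD_map_pyRange_of_nonneg _ rows i _ hi.1 hi.2]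
      have : (0 : Int) + (k : Int) = ((k : Nat) : Int) := by ring
      rw [this, PySem.List.pyGetD_natCast]
      rw [List.getD_eq_getElem _ _ (by simp [pvRow_length]; omega)]
      rw [List.getElem_append_left (by rw [pvRow_length]; exact hk)]
      simp [pvRow, PySem.List.getElem_pyRange_one]
    rw [List.map_congr_left hinner]
    simp

-- ===== VERDICT (by name: the statement is the Claim_ definition above) =====
theorem add_2d_parity_spec : Claim_equal_add_2d_parity := by
  intro data rows cols _ _
  unfold Spec_add_2d_parity add_2d_parity add_2d_parity_alt
  dsimp only
  rw [foldB_fst data cols, List.nil_append, ← colParity_eq data rows cols]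
  simp [List.map_map, Function.comp_def]
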